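-- pv_equiv track=rewrite | github.com/Heritier205/MesAlgoPython | AnalyseConceptionAlgo/compteur.py | procedure
-- ===== SOURCE A (Python) =====
-- def procedure(n):
--     cpt = 0
--     i = 1
--     while i < n:
--         j = i+1
--         while j <= n :
--             cpt = cpt+1
--             j = j+1
--         i = i*2
--     return cpt
-- ===== SOURCE B (Python) =====
-- def procedure(n):
--     # closed form: for each power of 2 i < n, the inner loop adds n - i increments;
--     # with k = number of powers of 2 below n, the total is k*n - (2^k - 1)
--     if n <= 1:
--         return 0
--     k = (n - 1).bit_length()
--     return k * n - (2 ** k - 1)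
-- ===== Notes on version B (the rewrite author's own statement) =====
-- stated objective: faster
-- what changed: Replaced the nested loops (outer doubling i, inner counting one by one) by the closed form k*n - (2^k - 1) with k = bit_length(n-1), the number of powers of 2 below n.
import Mathlib
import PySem

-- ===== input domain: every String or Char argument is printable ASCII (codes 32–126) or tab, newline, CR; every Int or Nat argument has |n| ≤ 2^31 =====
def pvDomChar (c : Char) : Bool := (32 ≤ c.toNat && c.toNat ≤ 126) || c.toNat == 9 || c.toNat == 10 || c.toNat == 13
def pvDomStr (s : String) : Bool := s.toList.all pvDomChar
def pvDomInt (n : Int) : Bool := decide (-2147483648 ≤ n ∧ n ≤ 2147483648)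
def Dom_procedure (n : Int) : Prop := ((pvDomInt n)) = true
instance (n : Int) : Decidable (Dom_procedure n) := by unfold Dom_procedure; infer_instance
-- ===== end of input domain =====

-- B replaces A's nested counting loops with the closed form k*n - (2^k - 1), k = bit_length(n-1): asymptotically faster.


-- ===== PORT A =====
-- inner while loop: while j <= n: cpt += 1; j += 1
def innerLoop (n j cpt : Int) : Int :=
  if j ≤ n then innerLoop n (j + 1) (cpt + 1) else cpt
  termination_by (n + 1 - j).toNat
  decreasing_by omega

-- outer while loop: while i < n: <inner loop from j = i+1>; i *= 2
-- (i is always positive in A, carried as the proof argument hi to justify termination)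
def outerLoop (n i cpt : Int) (hi : 0 < i) : Int :=
  if i < n then outerLoop n (i * 2) (innerLoop n (i + 1) cpt) (by omega) else cpt
  termination_by (n - i).toNat
  decreasing_by omega

def procedure (n : Int) : Int := outerLoop n 1 0 (by omega)

-- ===== PORT B =====
-- (n-1).bit_length() is Nat.size of (n-1).toNat
def procedure_alt (n : Int) : Int :=
  if n ≤ 1 then 0
  else
    let k : Nat := Nat.size (n - 1).toNat
    (k : Int) * n - (2 ^ k - 1)

-- ===== PRECONDITION & SPEC =====
def Spec_procedure (n : Int) (out : Int) : Prop := out = procedure_alt n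
instance (n : Int) (out : Int) : Decidable (Spec_procedure n out) := by unfold Spec_procedure; infer_instance

-- ===== CLAIM (what is proved, stated in full; the proofs are below) =====
def Claim_equal_procedure : Prop := ∀ (n : Int), Dom_procedure n → Spec_procedure n (procedure n)

-- ===== LEMMAS AND PROOFS =====
lemma inner_eq (n j cpt : Int) : innerLoop n j cpt = cpt + max (n + 1 - j) 0 := by
  fun_induction innerLoop n j cpt with
  | case1 j cpt h ih => rw [ih]; omega
  | case2 j cpt h => omega

lemma outer_eq (n : Int) (hn : 2 ≤ n) (k : Nat) (hk : k = Nat.size (n - 1).toNat) :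
    ∀ d t cpt (hd : t + d = k),
      outerLoop n (2 ^ t) cpt (by positivity) = cpt + ((k : Int) - t) * n - (2 ^ k - 2 ^ t) := by
  have hm : ((n - 1).toNat : Int) = n - 1 := by omega
  have hub : n ≤ 2 ^ k := by
    have := Nat.lt_size_self (n - 1).toNat
    rw [← hk] at this
    have : ((n - 1).toNat : Int) < ((2 ^ k : Nat) : Int) := by exact_mod_cast this
    push_cast at this; omega
  intro d
  induction d with
  | zero =>
    intro t cpt hd
    have ht : t = k := by omega
    subst ht
    have hng : ¬ (2 : Int) ^ t < n := by omega
    rw [outerLoop, if_neg hng]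
    ring
  | succ d ih =>
    intro t cpt hd
    have htk : t < k := by omega
    -- 2^t < n : since t ≤ k-1 and 2^(k-1) ≤ (n-1).toNat
    have hlow : (2 : Int) ^ t < n := by
      have h1 : ¬ Nat.size (n - 1).toNat ≤ k - 1 := by omega
      rw [Nat.size_le] at h1
      push_neg at h1
      have h2 : (2 : ℕ) ^ t ≤ 2 ^ (k - 1) := Nat.pow_le_pow_right (by norm_num) (by omega)
      have h3 : (2 : ℕ) ^ t ≤ (n - 1).toNat := le_trans h2 h1
      have : ((2 ^ t : Nat) : Int) ≤ ((n - 1).toNat : Int) := by exact_mod_cast h3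
      push_cast at this; omega
    rw [outerLoop]
    simp only [hlow, if_pos]
    have hstep : (2 : Int) ^ t * 2 = 2 ^ (t + 1) := by ring
    rw [inner_eq]
    have := ih (t + 1) (cpt + max (n + 1 - (2 ^ t + 1)) 0) (by omega)
    simp only [hstep]
    rw [this]
    have hmax : max (n + 1 - ((2:Int) ^ t + 1)) 0 = n - 2 ^ t := by omega
    rw [hmax]
    push_cast
    have h2t1 : (2 : Int) ^ (t + 1) = 2 ^ t * 2 := by ring
    rw [h2t1]
    ring

-- ===== VERDICT (by name: the statement is the Claim_ definition above) =====
theorem procedure_spec : Claim_equal_procedure := by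
  intro n _
  unfold Spec_procedure procedure procedure_alt
  by_cases h : n ≤ 1
  · rw [outerLoop]
    have : ¬ (1 : Int) < n := by omega
    simp [this, h]
  · have hn : 2 ≤ n := by omega
    have := outer_eq n hn (Nat.size (n - 1).toNat) rfl (Nat.size (n - 1).toNat) 0 0 (by omega)
    simp only [pow_zero] at this
    rw [this]
    simp [h]
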